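-- pv_equiv track=rewrite | github.com/wcAlex/learning | foundations/submission.py | findAlphabeticallyLastWord
-- ===== SOURCE A (Python) =====
-- def findAlphabeticallyLastWord(text):
--     """
--     Given a string |text|, return the word in |text| that comes last
--     alphabetically (that is, the word that would appear last in a dictionary).
--     A word is defined by a maximal sequence of characters without whitespaces.
--     You might find max() and list comprehensions handy here.
--     """
--     # BEGIN_YOUR_CODE (our solution is 1 line of code, but don't worry if you deviate from this)
--
--     words = text.split()
--     candidate = ""
--     for i, word in enumerate(words):
--         if i == 0:
--             candidate = word
--             continue
--
--         if max(candidate, word) != candidate: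
--             candidate = word
--
--     return candidate
-- ===== SOURCE B (Python) =====
-- def findAlphabeticallyLastWord(text):
--     words = text.split()
--     return sorted(words)[-1] if words else ""
-- ===== Notes on version B (the rewrite author's own statement) =====
-- stated objective: simpler
-- what changed: Replaces the enumerate loop with a running max by sorting the word list and taking its last element, with an explicit empty guard.
import Mathlib
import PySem

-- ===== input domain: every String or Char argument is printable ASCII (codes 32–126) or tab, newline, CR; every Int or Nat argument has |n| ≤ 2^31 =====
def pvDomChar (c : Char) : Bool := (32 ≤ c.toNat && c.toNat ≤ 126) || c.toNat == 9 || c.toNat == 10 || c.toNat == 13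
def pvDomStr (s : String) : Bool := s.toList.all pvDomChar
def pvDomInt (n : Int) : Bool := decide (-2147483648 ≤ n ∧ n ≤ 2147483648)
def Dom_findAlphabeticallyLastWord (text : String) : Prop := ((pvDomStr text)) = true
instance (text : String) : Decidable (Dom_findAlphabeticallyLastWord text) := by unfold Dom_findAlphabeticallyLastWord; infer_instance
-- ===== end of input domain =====

-- B replaces A's enumerate loop with a running max by sorting the word list and
-- taking its last element (objective: simpler).

-- ===== PORT A =====
def findAlphabeticallyLastWord (text : String) : String :=
  let words := PySem.Str.split₀ text
  (PySem.List.enumerate words).foldl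
    (fun candidate p =>
      if p.1 = 0 then p.2
      else if max candidate p.2 ≠ candidate then p.2 else candidate) ""

-- ===== PORT B =====
def findAlphabeticallyLastWord_alt (text : String) : String :=
  let words := PySem.Str.split₀ text
  if words.isEmpty then ""
  else ((PySem.List.sorted words (fun x => x) false).getLast?).getD ""

-- ===== PRECONDITION & SPEC =====
def Spec_findAlphabeticallyLastWord (text : String) (out : String) : Prop := out = findAlphabeticallyLastWord_alt text
instance (text : String) (out : String) : Decidable (Spec_findAlphabeticallyLastWord text out) := by unfold Spec_findAlphabeticallyLastWord; infer_instance

-- ===== CLAIM (what is proved, stated in full; the proofs are below) =====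
def Claim_equal_findAlphabeticallyLastWord : Prop := ∀ (text : String), Dom_findAlphabeticallyLastWord text → Spec_findAlphabeticallyLastWord text (findAlphabeticallyLastWord text)

-- ===== LEMMAS AND PROOFS =====

-- A's loop step is the running maximum once the index is nonzero.
theorem pv_step_eq_max (c w : String) :
    (if max c w ≠ c then w else c) = max c w := by
  by_cases h : w ≤ c
  · simp [max_eq_left h]
  · have hlt : c < w := lt_of_not_ge h
    simp [max_eq_right (le_of_lt hlt), ne_of_gt hlt]

-- A's fold over the enumerated tail (indices ≥ 1) is List.foldl max.
theorem pv_foldA_tail (t : List String) (s : Int) (hs : 1 ≤ s) (c : String) :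
    (PySem.List.enumerate t s).foldl
      (fun candidate p =>
        if p.1 = 0 then p.2
        else if max candidate p.2 ≠ candidate then p.2 else candidate) c
      = t.foldl max c := by
  induction t generalizing s c with
  | nil => simp [PySem.List.enumerate_nil]
  | cons w t ih =>
    have hs0 : s ≠ 0 := by omega
    rw [PySem.List.enumerate_cons, List.foldl_cons]
    have hred : (if (s, w).1 = 0 then (s, w).2
        else if max c (s, w).2 ≠ c then (s, w).2 else c) = max c w := by
      show (if s = 0 then w else if max c w ≠ c then w else c) = max c w
      rw [if_neg hs0, pv_step_eq_max]
    rw [hred, List.foldl_cons]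
    exact ih (s + 1) (by omega) (max c w)

-- The last element of the sorted list is the running maximum.
theorem pv_sorted_last (w : String) (t : List String) :
    ((PySem.List.sorted (w :: t) (fun x => x) false).getLast?).getD ""
      = t.foldl max w := by
  set s := PySem.List.sorted (w :: t) (fun x => x) false with hsdef
  have hne : s ≠ [] := by
    rw [hsdef, Ne, PySem.List.sorted_eq_nil_iff]; simp
  rw [List.getLast?_eq_some_getLast hne, Option.getD_some]
  have hpos : 0 < s.length := List.length_pos_of_ne_nil hne
  set l := s.getLast hne with hldef
  have hlmem : l ∈ w :: t := (PySem.List.mem_sorted _ _ _ _).mp (List.getLast_mem hne)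
  have hub : ∀ y ∈ w :: t, y ≤ l := by
    intro y hy
    have hys : y ∈ s := (PySem.List.mem_sorted _ _ _ _).mpr hy
    obtain ⟨i, hi, hyi⟩ := List.mem_iff_getElem.mp hys
    have hmono := PySem.List.key_sorted_getElem_mono (w :: t) (fun x => x)
      (p := i) (q := s.length - 1) (by omega) (by rw [← hsdef]; omega)
    simp only [← hsdef] at hmono
    have hl2 : l = s[s.length - 1]'(by omega) := List.getLast_eq_getElem hne
    rw [hl2, ← hyi]
    exact hmono
  set m := t.foldl max w with hmdef
  have hm := PySem.List.le_foldl_max t w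
  have hmmem : m ∈ w :: t := by
    rcases PySem.List.foldl_max_mem t w with h | h
    · rw [hmdef, h]; exact List.mem_cons_self
    · exact List.mem_cons_of_mem _ h
  have h1 : l ≤ m := by
    rcases List.mem_cons.mp hlmem with h | h
    · rw [h]; exact hm.1
    · exact hm.2 l h
  exact le_antisymm h1 (hub m hmmem)

-- ===== VERDICT (by name: the statement is the Claim_ definition above) =====
theorem findAlphabeticallyLastWord_spec : Claim_equal_findAlphabeticallyLastWord := by
  intro text _
  show findAlphabeticallyLastWord text = findAlphabeticallyLastWord_alt text
  unfold findAlphabeticallyLastWord findAlphabeticallyLastWord_alt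
  cases h : PySem.Str.split₀ text with
  | nil => simp [PySem.List.enumerate_nil]
  | cons w t =>
    dsimp only []
    rw [PySem.List.enumerate_cons, List.foldl_cons]
    have hred : (if ((0 : Int), w).1 = 0 then ((0 : Int), w).2
        else if max "" ((0 : Int), w).2 ≠ "" then ((0 : Int), w).2 else "") = w := by
      show (if (0 : Int) = 0 then w else if max "" w ≠ "" then w else "") = w
      rw [if_pos rfl]
    rw [hred, pv_foldA_tail t (0 + 1) (by omega) w, pv_sorted_last w t]
    simp
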